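-- pv_equiv track=rewrite | github.com/ryandakine/openclaw-orchestration-stack | devclaw-runner/src/arb_hunter/logging/metrics_reporter.py | _key_to_labels
-- ===== SOURCE A (Python) =====
-- from typing import Optional, Dict, Any, List
--
-- def _key_to_labels(key: str) -> Dict[str, str]:
--     """Convert key string back to labels dict."""
--     if not key:
--         return {}
--     labels = {}
--     for part in key.split("|"):
--         if "=" in part:
--             k, v = part.split("=", 1)
--             labels[k] = v
--     return labels
-- ===== SOURCE B (Python) =====
-- def _key_to_labels(key: str) -> dict:
--     """Convert key string back to labels dict (single-pass character state machine)."""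
--     labels = {}
--     cur_key = ""
--     cur_val = None
--     for ch in key:
--         if ch == "|":
--             if cur_val is not None:
--                 labels[cur_key] = cur_val
--             cur_key, cur_val = "", None
--         elif ch == "=" and cur_val is None:
--             cur_val = ""
--         elif cur_val is None:
--             cur_key += ch
--         else:
--             cur_val += ch
--     if cur_val is not None:
--         labels[cur_key] = cur_val
--     return labels
-- ===== Notes on version B (the rewrite author's own statement) =====
-- stated objective: alternative
-- what changed: Replaces the nested split('|') / split('=', 1) passes with a single left-to-right character state machine that accumulates the current key and optional value and flushes at each '|' boundary.
import Mathlib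
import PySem

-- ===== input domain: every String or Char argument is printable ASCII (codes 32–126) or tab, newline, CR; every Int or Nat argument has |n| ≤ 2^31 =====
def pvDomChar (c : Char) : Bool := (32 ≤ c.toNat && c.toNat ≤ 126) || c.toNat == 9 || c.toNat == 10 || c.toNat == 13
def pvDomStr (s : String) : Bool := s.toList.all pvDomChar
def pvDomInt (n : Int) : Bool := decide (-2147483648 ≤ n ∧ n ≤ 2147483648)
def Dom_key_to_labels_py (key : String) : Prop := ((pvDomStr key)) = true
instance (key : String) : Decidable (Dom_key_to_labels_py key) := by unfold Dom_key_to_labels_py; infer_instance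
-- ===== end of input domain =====

-- B replaces A's nested split('|')/split('=',1) passes with a single character-by-character
-- state machine (alternative decomposition, same asymptotic cost).

-- ===== PORT A =====
-- A's loop body: 'if "=" in part: k, v = part.split("=", 1); labels[k] = v'
def aStep (labels : PySem.Dict String String) (part : String) : PySem.Dict String String :=
  if PySem.Str.isIn "=" part then
    match PySem.Str.splitMax? part "=" 1 with
    | some (k :: v :: _) => labels.insert k v
    | _ => labels          -- unreachable: split("=",1) with "=" in part yields two pieces
  else labels

def key_to_labels_py (key : String) : List (String × String) :=
  if key = "" then []
  else
    -- key.split("|"): sep "|" is non-empty, so split? is always 'some'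
    (((PySem.Str.split? key "|").getD []).foldl aStep PySem.Dict.empty).items

-- ===== PORT B =====
-- one character of the scan: state = (labels so far, current key chars, current value chars if an '=' was seen)
def bStep (st : PySem.Dict String String × List Char × Option (List Char)) (ch : Char) :
    PySem.Dict String String × List Char × Option (List Char) :=
  match st with
  | (labels, curKey, curVal) =>
    if ch = '|' then
      (match curVal with
       | some v => labels.insert (String.ofList curKey) (String.ofList v)
       | none => labels, [], none)
    else if ch = '=' && curVal.isNone then
      (labels, curKey, some [])
    else
      match curVal with
      | none => (labels, curKey ++ [ch], none)
      | some v => (labels, curKey, some (v ++ [ch]))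

-- final flush of the pending part
def bFlush (st : PySem.Dict String String × List Char × Option (List Char)) :
    PySem.Dict String String :=
  match st with
  | (labels, curKey, some v) => labels.insert (String.ofList curKey) (String.ofList v)
  | (labels, _, none) => labels

def key_to_labels_py_alt (key : String) : List (String × String) :=
  (bFlush (key.toList.foldl bStep (PySem.Dict.empty, [], none))).items

-- ===== PRECONDITION & SPEC =====
def Spec_key_to_labels_py (key : String) (out : List (String × String)) : Prop := out = key_to_labels_py_alt key
instance (key : String) (out : List (String × String)) : Decidable (Spec_key_to_labels_py key out) := by unfold Spec_key_to_labels_py; infer_instance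

-- ===== CLAIM (what is proved, stated in full; the proofs are below) =====
def Claim_equal_key_to_labels_py : Prop := ∀ (key : String), Dom_key_to_labels_py key → Spec_key_to_labels_py key (key_to_labels_py key)

-- ===== LEMMAS AND PROOFS =====

-- simple recursive splitter on a single character '|'
def split1 (pre : List Char) : List Char → List (List Char)
  | [] => [pre]
  | c :: rest => if c = '|' then pre :: split1 [] rest else split1 (pre ++ [c]) rest

theorem splitOn_go_char (fuel : Nat) :
    ∀ (l cur : List Char) (acc : List (List Char)), l.length ≤ fuel →
      PySem.Chars.splitOn.go ['|'] fuel l cur acc = acc.reverse ++ split1 cur.reverse l := by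
  induction fuel with
  | zero =>
    intro l cur acc h
    have : l = [] := List.eq_nil_of_length_eq_zero (Nat.le_zero.mp h)
    subst this
    simp [PySem.Chars.splitOn.go, split1]
  | succ n ih =>
    intro l cur acc h
    cases l with
    | nil => simp [PySem.Chars.splitOn.go, split1]
    | cons c rest =>
      by_cases hc : c = '|'
      · subst hc
        rw [PySem.Chars.splitOn.go]
        rw [if_pos (by simp [List.isPrefixOf])]
        simp only [List.length_singleton, List.drop_succ_cons, List.drop_zero]
        rw [ih rest [] (cur.reverse :: acc) (by simpa using Nat.le_of_succ_le_succ h)]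
        simp [split1]
      · rw [PySem.Chars.splitOn.go]
        rw [if_neg (by simp [List.isPrefixOf]; intro h'; exact (hc h'.symm).elim)]
        rw [ih rest (c :: cur) acc (by simpa using Nat.le_of_succ_le_succ h)]
        simp [split1, hc]

theorem splitOn_char (cs : List Char) :
    PySem.Chars.splitOn cs ['|'] = split1 [] cs := by
  unfold PySem.Chars.splitOn
  rw [splitOn_go_char (cs.length + 1) cs [] [] (by omega)]
  simp

-- splitOnMax.go with budget 0 returns the rest as the last piece
theorem goMax0 (fuel : Nat) (l : List Char) (acc : List (List Char)) :
    PySem.Chars.splitOnMax.go ['='] fuel 0 l [] acc = acc.reverse ++ [l] := by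
  cases fuel with
  | zero => simp [PySem.Chars.splitOnMax.go.eq_def]
  | succ n =>
    cases l with
    | nil => simp [PySem.Chars.splitOnMax.go.eq_def]
    | cons c rest => rw [PySem.Chars.splitOnMax.go.eq_def]; simp

theorem goMax1 (k : List Char) :
    ∀ (fuel : Nat) (cur : List Char) (acc : List (List Char)) (vv : List Char),
      '=' ∉ k → (k ++ '=' :: vv).length + 1 ≤ fuel →
      PySem.Chars.splitOnMax.go ['='] fuel 1 (k ++ '=' :: vv) cur acc
        = acc.reverse ++ [cur.reverse ++ k, vv] := by
  induction k with
  | nil =>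
    intro fuel cur acc vv _ hf
    cases fuel with
    | zero => simp at hf
    | succ n =>
      rw [PySem.Chars.splitOnMax.go.eq_def]
      simp only [List.nil_append]
      rw [if_neg (by omega), if_pos (by simp [List.isPrefixOf])]
      simp only [List.length_singleton, List.drop_succ_cons, List.drop_zero]
      rw [show (1 : Nat) - 1 = 0 from rfl, goMax0]
      simp
  | cons c k ih =>
    intro fuel cur acc vv hk hf
    cases fuel with
    | zero => simp at hf
    | succ n =>
      have hc : c ≠ '=' := fun h => hk (h ▸ List.mem_cons_self)
      rw [PySem.Chars.splitOnMax.go.eq_def]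
      simp only [List.cons_append]
      rw [if_neg (by omega),
          if_neg (by simp [List.isPrefixOf]; intro h'; exact (hc h'.symm).elim)]
      rw [ih n (c :: cur) acc vv (fun h => hk (List.mem_cons_of_mem _ h)) (by simp at hf ⊢; omega)]
      simp

theorem splitOnMax_first (k vv : List Char) (hk : '=' ∉ k) :
    PySem.Chars.splitOnMax (k ++ '=' :: vv) ['='] 1 = [k, vv] := by
  unfold PySem.Chars.splitOnMax
  rw [if_neg (by norm_num)]
  simp only [Int.toNat_one]
  rw [goMax1 k ((k ++ '=' :: vv).length + 1) [] [] vv hk (by omega)]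
  simp

-- the pending part of B's state, as the raw text A would see
def sfRepr (k : List Char) : Option (List Char) → List Char
  | none => k
  | some vv => k ++ '=' :: vv

-- A's loop body on the raw text of a pending part = B's flush action on that state
theorem stepEq (d : PySem.Dict String String) (k : List Char) (v : Option (List Char))
    (hk : '=' ∉ k) : aStep d (String.ofList (sfRepr k v)) = bFlush (d, k, v) := by
  cases v with
  | none =>
    unfold aStep bFlush sfRepr
    rw [if_neg]
    simp only [PySem.Str.isIn, Bool.not_eq_true]
    rw [PySem.Chars.isIn_eq_false_iff]
    intro hinf
    exact hk (by simpa using hinf.mem (by simp))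
  | some vv =>
    unfold aStep bFlush sfRepr
    rw [if_pos]
    · have hsplit : PySem.Str.splitMax? (String.ofList (k ++ '=' :: vv)) "=" 1
          = some [String.ofList k, String.ofList vv] := by
        unfold PySem.Str.splitMax?
        simp only [String.toList_ofList]
        unfold PySem.Chars.splitMax?
        rw [if_neg (by simp)]
        rw [show ("=" : String).toList = ['='] from rfl, splitOnMax_first k vv hk]
        rfl
      rw [hsplit]
    · simp only [PySem.Str.isIn]
      rw [PySem.Chars.isIn_iff_infix]
      exact ⟨k, vv, by simp⟩

-- evaluation of B's step on the three kinds of characters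
theorem bStep_bar (d : PySem.Dict String String) (k : List Char) (v : Option (List Char)) :
    bStep (d, k, v) '|' = (bFlush (d, k, v), [], none) := by
  cases v <;> rfl

theorem bStep_eqSign_none (d : PySem.Dict String String) (k : List Char) :
    bStep (d, k, none) '=' = (d, k, some []) := rfl

theorem bStep_other_none (d : PySem.Dict String String) (k : List Char) (c : Char)
    (h1 : c ≠ '|') (h2 : c ≠ '=') : bStep (d, k, none) c = (d, k ++ [c], none) := by
  simp [bStep, h1, h2]

theorem bStep_some (d : PySem.Dict String String) (k vv : List Char) (c : Char)
    (h1 : c ≠ '|') : bStep (d, k, some vv) c = (d, k, some (vv ++ [c])) := by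
  simp [bStep, h1]

-- main invariant: flushing B's scan of cs from state (d, k, v) is A's fold over the
-- '|'-parts of the remaining text, the pending part prepended
theorem mainInv (cs : List Char) :
    ∀ (d : PySem.Dict String String) (k : List Char) (v : Option (List Char)), '=' ∉ k →
      bFlush (cs.foldl bStep (d, k, v))
        = (split1 (sfRepr k v) cs).foldl (fun d p => aStep d (String.ofList p)) d := by
  induction cs with
  | nil =>
    intro d k v hk
    simp only [List.foldl_nil, split1, List.foldl_cons]
    exact (stepEq d k v hk).symm
  | cons c rest ih =>
    intro d k v hk
    by_cases hbar : c = '|'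
    · subst hbar
      rw [List.foldl_cons, bStep_bar, ih _ [] none (by simp), ← stepEq d k v hk]
      simp [split1, sfRepr]
    · cases v with
      | none =>
        by_cases hc : c = '='
        · subst hc
          rw [List.foldl_cons, bStep_eqSign_none, ih d k (some []) hk]
          simp [split1, sfRepr, hbar]
        · rw [List.foldl_cons, bStep_other_none d k c hbar hc,
              ih d (k ++ [c]) none (by simp [hk]; exact fun h => hc h.symm)]
          simp [split1, sfRepr, hbar]
      | some vv =>
        rw [List.foldl_cons, bStep_some d k vv c hbar, ih d k (some (vv ++ [c])) hk]
        simp [split1, sfRepr, hbar]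

-- ===== VERDICT (by name: the statement is the Claim_ definition above) =====
theorem key_to_labels_py_spec : Claim_equal_key_to_labels_py := by
  intro key _
  unfold Spec_key_to_labels_py key_to_labels_py key_to_labels_py_alt
  by_cases h : key = ""
  · subst h
    rfl
  · rw [if_neg h]
    have hsplit : PySem.Str.split? key "|"
        = some ((split1 [] key.toList).map String.ofList) := by
      unfold PySem.Str.split? PySem.Chars.split?
      rw [if_neg (by simp)]
      rw [show ("|" : String).toList = ['|'] from rfl, splitOn_char]
      rfl
    rw [hsplit]
    simp only [Option.getD_some, List.foldl_map]
    rw [mainInv key.toList PySem.Dict.empty [] none (by simp)]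
    rfl
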